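-- pv_equiv track=rewrite | github.com/IliasN/aoc2020 | Day21/main.py | solve1
-- ===== SOURCE A (Python) =====
-- def solve1(lines, alerset):
--     lines_cpy = lines.copy()
--     alergenes_found = dict()
--     cnt = True
--     ret_set = set()
--     while len(alerset) != 0 and cnt:
--         cnt = False
--         for aler in alerset:
--             curr_sets = list()
--             for line in lines:
--                 found_set = set()
--                 if aler in line[1]:
--                     for ingr in line[0]:
--                         found_set.add(ingr)
--                     curr_sets.append(found_set)
--             if len(curr_sets) > 0:
--                 result_set = curr_sets[0].intersection(*curr_sets)
--                 if len(result_set) == 1: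
--                     cnt = True
--                     ingr = list(result_set)[0]
--                     alerset.remove(aler)
--                     ret_set.add(ingr)
--                     alergenes_found[ingr] = aler
--                     for line in lines:
--                         if ingr in line[0]:
--                             line[0].remove(ingr)
--                         if aler in line[1]:
--                             line[1].remove(aler)
--                     break
--     count = 0
--     for line in lines_cpy:
--         for i in line[0]:
--             if i not in ret_set:
--                 count += 1
--     return count, alergenes_found
-- ===== SOURCE B (Python) =====
-- # B: precompute each allergen's candidate intersection once, then run singleton-elimination
-- # constraint propagation on those sets (A re-scans and re-intersects the mutated recipe lists
-- # every round).  Return-value equivalence only: A mutates `lines`' inner lists and `alerset`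
-- # in place; B leaves its arguments untouched.
-- def solve1(lines, alerset):
--     cands = {}
--     for aler in alerset:
--         sets = [set(ingrs) for ingrs, alers in lines if aler in alers]
--         if sets:
--             cands[aler] = set.intersection(sets[0], *sets[1:])
--     remaining = list(alerset)
--     assigned = set()
--     found = {}
--     progress = True
--     while remaining and progress:
--         progress = False
--         for aler in remaining:
--             if aler in cands:
--                 cand = cands[aler] - assigned
--                 if len(cand) == 1:
--                     (ingr,) = cand
--                     found[ingr] = aler
--                     assigned.add(ingr)
--                     remaining.remove(aler)
--                     progress = True
--                     break
--     count = sum(1 for ingrs, _ in lines for i in ingrs if i not in assigned)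
--     return count, found
-- ===== Notes on version B (the rewrite author's own statement) =====
-- stated objective: faster
-- what changed: A re-builds and re-intersects ingredient sets from the mutated recipe lists on every round of the elimination loop; B precomputes each allergen's candidate intersection once and then runs singleton-elimination propagation by subtracting the assigned-ingredient set, so the per-round rescan of all lines disappears (B also leaves its arguments unmutated, equivalence is about the return value).
import Mathlib
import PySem

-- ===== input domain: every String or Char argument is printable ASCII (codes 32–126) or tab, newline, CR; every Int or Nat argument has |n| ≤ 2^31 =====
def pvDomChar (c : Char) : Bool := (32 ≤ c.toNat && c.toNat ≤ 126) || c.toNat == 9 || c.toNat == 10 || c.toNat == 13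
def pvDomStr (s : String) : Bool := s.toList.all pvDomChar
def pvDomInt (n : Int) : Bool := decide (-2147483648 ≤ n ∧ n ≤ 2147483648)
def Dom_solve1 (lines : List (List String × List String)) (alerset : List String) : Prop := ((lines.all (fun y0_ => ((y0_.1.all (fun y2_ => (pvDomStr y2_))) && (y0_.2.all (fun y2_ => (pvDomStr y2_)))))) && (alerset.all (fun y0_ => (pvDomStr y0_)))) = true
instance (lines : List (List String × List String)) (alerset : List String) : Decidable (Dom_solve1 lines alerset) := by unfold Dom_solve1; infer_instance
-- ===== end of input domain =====

-- B precomputes each allergen's candidate intersection once and then runs singleton-elimination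
-- propagation on those sets, where A re-builds and re-intersects sets from the mutated recipe
-- lists on every round.  Return-value equivalence only: Python A mutates `lines`' inner lists
-- and `alerset` in place; Python B leaves its arguments untouched.

-- ===== PORT A =====
-- found_set = set(); for ingr in line[0]: found_set.add(ingr)
def pvFoundSet (ingrs : List String) : PySem.Set String :=
  ingrs.foldl (fun s i => PySem.Set.add s i) PySem.Set.empty

-- curr_sets built over the lines whose allergen list mentions aler
def pvCurrSets (lines : List (List String × List String)) (aler : String) :
    List (PySem.Set String) :=
  lines.foldl (fun acc line => if line.2.contains aler then acc ++ [pvFoundSet line.1] else acc) []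

-- the inner `for aler in alerset` loop up to the first `break` (returns the assignment made)
def pvScanA (lines : List (List String × List String)) :
    List String → Option (String × String)
  | [] => none
  | aler :: rest =>
    match pvCurrSets lines aler with
    | [] => pvScanA lines rest
    | c0 :: cs =>
      -- result_set = curr_sets[0].intersection(*curr_sets); used only when len == 1
      match (c0 :: cs).foldl PySem.Set.inter c0 with
      | [ingr] => some (aler, ingr)
      | _ => pvScanA lines rest

-- for line in lines: if ingr in line[0]: line[0].remove(ingr); if aler in line[1]: line[1].remove(aler)
def pvRemoveLines (lines : List (List String × List String)) (ingr aler : String) :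
    List (List String × List String) :=
  lines.map (fun line =>
    ((if line.1.contains ingr then (PySem.List.remove? line.1 ingr).getD line.1 else line.1),
     (if line.2.contains aler then (PySem.List.remove? line.2 aler).getD line.2 else line.2)))

-- the `while len(alerset) != 0 and cnt` loop; fuel = one unit per pass (each productive pass
-- removes one allergen, so |alerset| + 1 units suffice)
def pvLoopA (fuel : Nat) (lines : List (List String × List String)) (alers : List String)
    (found : PySem.Dict String String) (retset : PySem.Set String) (cnt : Bool) :
    List (List String × List String) × PySem.Dict String String × PySem.Set String :=
  match fuel with
  | 0 => (lines, found, retset)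
  | fuel + 1 =>
    if alers ≠ [] ∧ cnt = true then
      match pvScanA lines alers with
      | none => (lines, found, retset)   -- full pass without a break: cnt stays False, loop ends
      | some (aler, ingr) =>
          pvLoopA fuel (pvRemoveLines lines ingr aler) ((PySem.List.remove? alers aler).getD alers)
            (found.insert ingr aler) (PySem.Set.add retset ingr) true
    else (lines, found, retset)

def solve1 (lines : List (List String × List String)) (alerset : List String) :
    Int × (List (String × String)) :=
  let r := pvLoopA (alerset.length + 1) lines alerset PySem.Dict.empty PySem.Set.empty true
  -- lines_cpy is a shallow copy: the count loop reads the mutated inner lists (= r.1)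
  let count : Int :=
    r.1.foldl (fun c line => line.1.foldl (fun c i => if PySem.Set.contains r.2.2 i then c else c + 1) c) 0
  (count, r.2.1.items)

-- ===== PORT B =====
-- set.intersection(sets[0], *sets[1:])
def pvInterAllB (s0 : PySem.Set String) (rest : List (PySem.Set String)) : PySem.Set String :=
  rest.foldl PySem.Set.inter s0

-- cands = {aler: intersection of set(line[0]) over lines with aler in line[1], if any line}
def pvCands (lines : List (List String × List String)) (alerset : List String) :
    PySem.Dict String (PySem.Set String) :=
  alerset.foldl (fun d aler =>
    match (lines.filter (fun line => line.2.contains aler)).map (fun line => PySem.Set.ofList line.1) with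
    | [] => d
    | s0 :: rest => d.insert aler (pvInterAllB s0 rest)) PySem.Dict.empty

-- the `for aler in remaining` loop up to the first `break`
def pvScanB (cands : PySem.Dict String (PySem.Set String)) (assigned : PySem.Set String) :
    List String → Option (String × String)
  | [] => none
  | aler :: rest =>
    match cands.get? aler with
    | none => pvScanB cands assigned rest
    | some s =>
      match PySem.Set.diff s assigned with
      | [ingr] => some (aler, ingr)
      | _ => pvScanB cands assigned rest

-- the `while remaining and progress` loop
def pvLoopB (fuel : Nat) (cands : PySem.Dict String (PySem.Set String)) (remaining : List String)
    (assigned : PySem.Set String) (found : PySem.Dict String String) :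
    PySem.Set String × PySem.Dict String String :=
  match fuel with
  | 0 => (assigned, found)
  | fuel + 1 =>
    if remaining ≠ [] then
      match pvScanB cands assigned remaining with
      | none => (assigned, found)
      | some (aler, ingr) =>
          pvLoopB fuel cands ((PySem.List.remove? remaining aler).getD remaining)
            (PySem.Set.add assigned ingr) (found.insert ingr aler)
    else (assigned, found)

def solve1_alt (lines : List (List String × List String)) (alerset : List String) :
    Int × (List (String × String)) :=
  let r := pvLoopB (alerset.length + 1) (pvCands lines alerset) alerset PySem.Set.empty PySem.Dict.empty
  let count : Int :=
    lines.foldl (fun c line => line.1.foldl (fun c i => if PySem.Set.contains r.1 i then c else c + 1) c) 0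
  (count, r.2.items)

-- ===== PRECONDITION & SPEC =====
-- Each line's ingredient collection and alerset are Python sets, so a list argument here is a
-- set's encoding; Pre_ restricts to the duplicate-free lists, the only ones that encode a set
-- (on a duplicate-carrying list A's one-occurrence .remove could leave a stale duplicate).
def Pre_solve1 (lines : List (List String × List String)) (alerset : List String) : Prop :=
  (∀ line ∈ lines, line.1.Nodup) ∧ alerset.Nodup
instance (lines : List (List String × List String)) (alerset : List String) :
    Decidable (Pre_solve1 lines alerset) := by unfold Pre_solve1; infer_instance

def pvWitness_solve1 : (List (List String × List String)) × List String :=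
  ([(["a", "b"], ["x"])], ["x"])

def Spec_solve1 (lines : List (List String × List String)) (alerset : List String)
    (out : Int × (List (String × String))) : Prop := out = solve1_alt lines alerset
instance (lines : List (List String × List String)) (alerset : List String)
    (out : Int × (List (String × String))) : Decidable (Spec_solve1 lines alerset out) := by
  unfold Spec_solve1; infer_instance

-- ===== CLAIM (what is proved, stated in full; the proofs are below) =====
def Claim_equal_solve1 : Prop := ∀ (lines : List (List String × List String)) (alerset : List String),
  Dom_solve1 lines alerset → Pre_solve1 lines alerset → Spec_solve1 lines alerset (solve1 lines alerset)

-- ===== LEMMAS AND PROOFS =====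

-- the relation A's mutated lines keep to the original ones: ingredient lists are the original
-- ones filtered by "not yet assigned", and membership of any still-pending allergen is unchanged
def pvLineRel (R : PySem.Set String) (rem : List String)
    (l lc : List String × List String) : Prop :=
  lc.1 = l.1.filter (fun x => !(PySem.Set.contains R x)) ∧
  ∀ a ∈ rem, lc.2.contains a = l.2.contains a

-- B's candidate map, per key
def pvIa (lines : List (List String × List String)) (a : String) : Option (PySem.Set String) :=
  match (lines.filter (fun line => line.2.contains a)).map (fun line => PySem.Set.ofList line.1) with
  | [] => none
  | s0 :: rest => some (pvInterAllB s0 rest)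

lemma pvMemInterFold (cs : List (PySem.Set String)) (c0 : PySem.Set String) (x : String) :
    x ∈ cs.foldl PySem.Set.inter c0 ↔ x ∈ c0 ∧ ∀ c ∈ cs, x ∈ c := by
  induction cs generalizing c0 with
  | nil => simp
  | cons c cs ih =>
    simp [List.foldl_cons, ih, PySem.Set.mem_inter]
    tauto

lemma pvNodupInterFold (cs : List (PySem.Set String)) (c0 : PySem.Set String)
    (h : c0.Nodup) : (cs.foldl PySem.Set.inter c0).Nodup := by
  induction cs generalizing c0 with
  | nil => exact h
  | cons c cs ih => exact ih _ (PySem.Set.nodup_inter _ _ h)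

lemma pvFoundSet_eq (ingrs : List String) : pvFoundSet ingrs = PySem.Set.ofList ingrs := by
  rw [pvFoundSet, PySem.Set.ofList_eq_foldl]; rfl

lemma pvCands_get?_gen (lines : List (List String × List String)) (alers : List String)
    (d : PySem.Dict String (PySem.Set String)) (a : String) :
    (alers.foldl (fun d aler =>
      match (lines.filter (fun line => line.2.contains aler)).map (fun line => PySem.Set.ofList line.1) with
      | [] => d
      | s0 :: rest => d.insert aler (pvInterAllB s0 rest)) d).get? a =
    if a ∈ alers ∧ (pvIa lines a).isSome then pvIa lines a else d.get? a := by
  induction alers generalizing d with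
  | nil => simp
  | cons b alers ih =>
    rw [List.foldl_cons, ih]
    by_cases hab : a = b
    · subst hab
      cases hIa : (lines.filter (fun line => line.2.contains a)).map (fun line => PySem.Set.ofList line.1) with
      | nil =>
        have h0 : pvIa lines a = none := by unfold pvIa; rw [hIa]
        simp [h0]
      | cons s0 rest =>
        have h0 : pvIa lines a = some (pvInterAllB s0 rest) := by unfold pvIa; rw [hIa]
        simp [h0, PySem.Dict.get?_insert_self]
    · cases hIa : (lines.filter (fun line => line.2.contains b)).map (fun line => PySem.Set.ofList line.1) with
      | nil => simp [hab]
      | cons s0 rest =>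
        rw [PySem.Dict.get?_insert_of_ne _ _ hab]
        simp [hab]

lemma pvCands_get? (lines : List (List String × List String)) (alerset : List String)
    (a : String) (ha : a ∈ alerset) : (pvCands lines alerset).get? a = pvIa lines a := by
  rw [pvCands, pvCands_get?_gen]
  cases h : pvIa lines a with
  | none => simp [ha]
  | some s => simp [ha]


lemma pvCurrSets_eq (lines : List (List String × List String)) (aler : String) :
    pvCurrSets lines aler =
      (lines.filter (fun line => line.2.contains aler)).map (fun line => pvFoundSet line.1) := by
  rw [pvCurrSets, PySem.List.foldl_append_if]
  rfl

-- pointwise relation between B's candidate sets (from the original lines) and A's current ones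
lemma pvSets_rel (lines linesC : List (List String × List String)) (R : PySem.Set String)
    (rem : List String) (a : String) (ha : a ∈ rem)
    (hF : List.Forall₂ (pvLineRel R rem) lines linesC) :
    List.Forall₂ (fun sB sA => ∀ x, x ∈ sA ↔ x ∈ sB ∧ x ∉ R)
      ((lines.filter (fun line => line.2.contains a)).map (fun line => PySem.Set.ofList line.1))
      ((linesC.filter (fun line => line.2.contains a)).map (fun line => pvFoundSet line.1)) := by
  induction hF with
  | nil => exact List.Forall₂.nil
  | @cons l lc ls lcs hrel hF ih =>
    obtain ⟨h1, h2⟩ := hrel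
    rw [List.filter_cons, List.filter_cons, h2 a ha]
    by_cases hc : l.2.contains a = true
    · rw [if_pos hc, if_pos hc, List.map_cons, List.map_cons]
      refine List.Forall₂.cons ?_ ih
      intro x
      rw [pvFoundSet_eq, PySem.Set.mem_ofList, PySem.Set.mem_ofList, h1, List.mem_filter]
      simp
    · rw [if_neg hc, if_neg hc]
      exact ih

lemma pvForall_mem_iff (R : PySem.Set String) (lB lA : List (PySem.Set String))
    (h : List.Forall₂ (fun sB sA => ∀ x, x ∈ sA ↔ x ∈ sB ∧ x ∉ R) lB lA) (x : String) :
    (∀ c ∈ lA, x ∈ c) ↔ (∀ c ∈ lB, x ∈ c ∧ x ∉ R) := by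
  induction h with
  | nil => simp
  | cons hrel h ih => simp [hrel x, ih]

-- the two scans agree under the invariant
lemma pvScan_eq (lines linesC : List (List String × List String)) (alerset : List String)
    (R : PySem.Set String) (rem : List String)
    (hF : List.Forall₂ (pvLineRel R rem) lines linesC)
    (rs : List String) (hsub : ∀ a ∈ rs, a ∈ rem) (hsub' : ∀ a ∈ rem, a ∈ alerset) :
    pvScanA linesC rs = pvScanB (pvCands lines alerset) R rs := by
  induction rs with
  | nil => rfl
  | cons a rs ih =>
    have ihr : pvScanA linesC rs = pvScanB (pvCands lines alerset) R rs :=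
      ih (fun b hb => hsub b (List.mem_cons_of_mem _ hb))
    have ha : a ∈ rem := hsub a (List.mem_cons_self ..)
    have hrel := pvSets_rel lines linesC R rem a ha hF
    rw [pvScanA, pvScanB, pvCurrSets_eq, pvCands_get? lines alerset a (hsub' a ha)]
    cases hB : (lines.filter (fun line => line.2.contains a)).map (fun line => PySem.Set.ofList line.1) with
    | nil =>
      rw [hB] at hrel
      have hA0 := List.forall₂_nil_left_iff.mp hrel
      have h0 : pvIa lines a = none := by unfold pvIa; rw [hB]
      rw [h0, hA0]
      exact ihr
    | cons sB restB =>
      rw [hB] at hrel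
      rcases List.forall₂_cons_left_iff.mp hrel with ⟨sA, restA, hrel0, hrelt, hmapA⟩
      have h0 : pvIa lines a = some (pvInterAllB sB restB) := by unfold pvIa; rw [hB]
      rw [h0, hmapA]
      show (match (sA :: restA).foldl PySem.Set.inter sA with
            | [ingr] => some (a, ingr)
            | _ => pvScanA linesC rs) =
          (match PySem.Set.diff (pvInterAllB sB restB) R with
            | [ingr] => some (a, ingr)
            | _ => pvScanB (pvCands lines alerset) R rs)
      -- the two candidate sets are permutations of each other
      have hndA : ((sA :: restA).foldl PySem.Set.inter sA).Nodup := by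
        apply pvNodupInterFold
        have : sA ∈ (linesC.filter (fun line => line.2.contains a)).map (fun line => pvFoundSet line.1) := by
          rw [hmapA]; exact List.mem_cons_self ..
        obtain ⟨l, _, hl⟩ := List.mem_map.mp this
        rw [← hl, pvFoundSet_eq]
        exact PySem.Set.nodup_ofList _
      have hndB : (PySem.Set.diff (pvInterAllB sB restB) R).Nodup := by
        apply PySem.Set.nodup_diff
        apply pvNodupInterFold
        have : sB ∈ (lines.filter (fun line => line.2.contains a)).map (fun line => PySem.Set.ofList line.1) := by
          rw [hB]; exact List.mem_cons_self ..
        obtain ⟨l, _, hl⟩ := List.mem_map.mp this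
        rw [← hl]
        exact PySem.Set.nodup_ofList _
      have hmem : ∀ x, x ∈ (sA :: restA).foldl PySem.Set.inter sA ↔
          x ∈ PySem.Set.diff (pvInterAllB sB restB) R := by
        intro x
        rw [pvMemInterFold, PySem.Set.mem_diff, pvInterAllB, pvMemInterFold]
        have htr := pvForall_mem_iff R (sB :: restB) (sA :: restA)
          (List.Forall₂.cons hrel0 hrelt) x
        constructor
        · rintro ⟨hx0, hall⟩
          have := htr.mp hall
          have hsB := this sB (List.mem_cons_self ..)
          exact ⟨⟨hsB.1, fun c hc => (this c (List.mem_cons_of_mem _ hc)).1⟩, hsB.2⟩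
        · rintro ⟨⟨hx0, hall⟩, hR⟩
          have : ∀ c ∈ sB :: restB, x ∈ c ∧ x ∉ R := by
            intro c hc
            rcases List.mem_cons.mp hc with h | h
            · exact ⟨h ▸ hx0, hR⟩
            · exact ⟨hall c h, hR⟩
          have h2 := htr.mpr this
          exact ⟨h2 sA (List.mem_cons_self ..), h2⟩
      have hperm : ((sA :: restA).foldl PySem.Set.inter sA).Perm
          (PySem.Set.diff (pvInterAllB sB restB) R) :=
        (List.perm_ext_iff_of_nodup hndA hndB).mpr hmem
      cases hc : PySem.Set.diff (pvInterAllB sB restB) R with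
      | nil =>
        have hA0 : (sA :: restA).foldl PySem.Set.inter sA = [] := by
          rw [hc] at hperm; exact hperm.eq_nil
        rw [hA0]
        exact ihr
      | cons y t =>
        cases t with
        | nil =>
          have hA1 : (sA :: restA).foldl PySem.Set.inter sA = [y] := by
            rw [hc] at hperm; exact List.perm_singleton.mp hperm
          rw [hA1]
        | cons z t =>
          have hlen := hperm.length_eq
          rw [hc] at hlen
          cases hA : (sA :: restA).foldl PySem.Set.inter sA with
          | nil => rw [hA] at hlen; simp at hlen
          | cons u v =>
            cases v with
            | nil => rw [hA] at hlen; simp at hlen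
            | cons w v =>
              exact ihr

lemma pvScanB_mem (cands : PySem.Dict String (PySem.Set String)) (assigned : PySem.Set String)
    (rs : List String) (a i : String) (h : pvScanB cands assigned rs = some (a, i)) : a ∈ rs := by
  induction rs with
  | nil => simp [pvScanB] at h
  | cons b rs ih =>
    rw [pvScanB] at h
    cases hg : cands.get? b with
    | none =>
      simp only [hg] at h
      exact List.mem_cons_of_mem _ (ih h)
    | some s =>
      simp only [hg] at h
      cases hd : PySem.Set.diff s assigned with
      | nil => simp only [hd] at h; exact List.mem_cons_of_mem _ (ih h)
      | cons x t =>
        cases t with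
        | nil =>
          simp only [hd] at h
          simp at h
          simp [h.1]
        | cons y t => simp only [hd] at h; exact List.mem_cons_of_mem _ (ih h)

-- one assignment step preserves the invariant
lemma pvRel_step (lines linesC : List (List String × List String)) (R : PySem.Set String)
    (rem : List String) (a i : String)
    (hF : List.Forall₂ (pvLineRel R rem) lines linesC)
    (hPre1 : ∀ line ∈ lines, line.1.Nodup) (hnd : rem.Nodup) :
    List.Forall₂ (pvLineRel (PySem.Set.add R i) (rem.erase a)) lines (pvRemoveLines linesC i a) := by
  induction hF with
  | nil => exact List.Forall₂.nil
  | @cons l lc ls lcs hrel hF ih =>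
    have hPre1' : ∀ line ∈ ls, line.1.Nodup := fun line hm => hPre1 line (List.mem_cons_of_mem _ hm)
    refine List.Forall₂.cons ?_ (ih hPre1')
    obtain ⟨h1, h2⟩ := hrel
    constructor
    · -- ingredient component
      have hnd1 : l.1.Nodup := hPre1 l (List.mem_cons_self ..)
      have hfil : lc.1.Nodup := by rw [h1]; exact hnd1.filter _
      have herase : (if lc.1.contains i then (PySem.List.remove? lc.1 i).getD lc.1 else lc.1)
          = lc.1.erase i := by
        by_cases hi : i ∈ lc.1
        · rw [if_pos (by simpa using hi), PySem.List.remove?_eq_some_erase lc.1 i hi]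
          rfl
        · rw [if_neg (by simpa using hi), List.erase_of_not_mem hi]
      show (if lc.1.contains i then (PySem.List.remove? lc.1 i).getD lc.1 else lc.1)
          = l.1.filter (fun x => !(PySem.Set.contains (PySem.Set.add R i) x))
      rw [herase, h1, (hnd1.filter _).erase_eq_filter, List.filter_filter]
      apply List.filter_congr
      intro x _
      by_cases hxR : x ∈ R <;> by_cases hxi : x = i <;>
        simp [hxR, hxi, PySem.Set.mem_add]
    · -- allergen component: membership of every still-pending allergen is unchanged
      intro b hb
      have hbrem : b ∈ rem := List.mem_of_mem_erase hb
      have hba : b ≠ a := (List.Nodup.mem_erase_iff hnd).mp hb |>.1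
      show (if lc.2.contains a then (PySem.List.remove? lc.2 a).getD lc.2 else lc.2).contains b
          = l.2.contains b
      rw [← h2 b hbrem]
      by_cases hal : a ∈ lc.2
      · rw [if_pos (by simpa using hal), PySem.List.remove?_eq_some_erase lc.2 a hal]
        show (lc.2.erase a).contains b = lc.2.contains b
        simp [List.mem_erase_of_ne hba]
      · rw [if_neg (by simpa using hal)]

-- the two loops agree and the final mutated lines stay characterised
lemma pvLoop_eq (lines : List (List String × List String)) (alerset : List String)
    (hPre1 : ∀ line ∈ lines, line.1.Nodup) :
    ∀ (fuel : Nat) (rem : List String) (linesC : List (List String × List String))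
      (R : PySem.Set String) (found : PySem.Dict String String),
      List.Forall₂ (pvLineRel R rem) lines linesC →
      rem.Nodup → (∀ a ∈ rem, a ∈ alerset) → rem.length < fuel →
      pvLoopA fuel linesC rem found R true =
        (((pvLoopA fuel linesC rem found R true).1 : List (List String × List String)),
          (pvLoopB fuel (pvCands lines alerset) rem R found).2,
          (pvLoopB fuel (pvCands lines alerset) rem R found).1) ∧
      List.Forall₂
        (fun l lf => lf.1 = l.1.filter
          (fun x => !(PySem.Set.contains (pvLoopB fuel (pvCands lines alerset) rem R found).1 x)))
        lines (pvLoopA fuel linesC rem found R true).1 := by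
  intro fuel
  induction fuel with
  | zero => intro rem linesC R found _ _ _ hlt; exact absurd hlt (Nat.not_lt_zero _)
  | succ n ih =>
    intro rem linesC R found hF hnd hsub hlt
    rw [pvLoopA, pvLoopB]
    by_cases hrem : rem = []
    · subst hrem
      rw [if_neg (by simp), if_neg (by simp)]
      exact ⟨rfl, List.Forall₂.imp (fun _ _ h => h.1) hF⟩
    · rw [if_pos ⟨hrem, rfl⟩, if_pos hrem,
        pvScan_eq lines linesC alerset R rem hF rem (fun a ha => ha) hsub]
      cases hscan : pvScanB (pvCands lines alerset) R rem with
      | none =>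
        dsimp only
        exact ⟨rfl, List.Forall₂.imp (fun _ _ h => h.1) hF⟩
      | some p =>
        obtain ⟨a, i⟩ := p
        have ha : a ∈ rem := pvScanB_mem _ _ _ _ _ hscan
        dsimp only
        rw [PySem.List.remove?_eq_some_erase rem a ha, Option.getD_some]
        have hF' := pvRel_step lines linesC R rem a i hF hPre1 hnd
        have hnd' : (rem.erase a).Nodup := hnd.erase a
        have hsub2 : ∀ b ∈ rem.erase a, b ∈ alerset := fun b hb =>
          hsub b (List.mem_of_mem_erase hb)
        have hlt' : (rem.erase a).length < n := by
          have := List.length_erase_of_mem ha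
          have hpos : 0 < rem.length := List.length_pos_of_mem ha
          omega
        exact ih (rem.erase a) (pvRemoveLines linesC i a) (PySem.Set.add R i)
          (found.insert i a) hF' hnd' hsub2 hlt'

lemma pvCountInner (R : PySem.Set String) (l : List String) (c : Int) :
    l.foldl (fun c i => if PySem.Set.contains R i then c else c + 1) c =
      c + (l.filter (fun x => !(PySem.Set.contains R x))).length := by
  induction l generalizing c with
  | nil => simp
  | cons x l ih =>
    rw [List.foldl_cons]
    by_cases hx : PySem.Set.contains R x = true
    · have hxm : x ∈ R := (PySem.Set.contains_iff _ _).mp hx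
      rw [if_pos hx, ih, List.filter_cons]
      simp [hxm]
    · have hxm : x ∉ R := fun hm => hx ((PySem.Set.contains_iff _ _).mpr hm)
      rw [if_neg hx, ih, List.filter_cons]
      simp [hxm]
      omega

lemma pvCount_eq (R : PySem.Set String) (lines linesF : List (List String × List String))
    (hF : List.Forall₂ (fun l lf => lf.1 = l.1.filter (fun x => !(PySem.Set.contains R x))) lines linesF) :
    ∀ c : Int, linesF.foldl (fun c line => line.1.foldl (fun c i => if PySem.Set.contains R i then c else c + 1) c) c =
      lines.foldl (fun c line => line.1.foldl (fun c i => if PySem.Set.contains R i then c else c + 1) c) c := by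
  induction hF with
  | nil => intro c; rfl
  | cons hrel hF ih =>
    intro c
    rw [List.foldl_cons, List.foldl_cons, ih]
    congr 1
    rw [hrel, pvCountInner, pvCountInner, List.filter_filter]
    simp

-- ===== VERDICT (by name: the statement is the Claim_ definition above) =====
theorem solve1_spec : Claim_equal_solve1 := by
  intro lines alerset _ hpre
  obtain ⟨hPre1, hnd⟩ := hpre
  unfold Spec_solve1
  have hinit : List.Forall₂ (pvLineRel PySem.Set.empty alerset) lines lines := by
    rw [List.forall₂_same]
    intro l _
    refine ⟨?_, fun a _ => rfl⟩
    simp [PySem.Set.empty]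
  obtain ⟨hEq, hFor⟩ := pvLoop_eq lines alerset hPre1 (alerset.length + 1) alerset lines
    PySem.Set.empty PySem.Dict.empty hinit hnd (fun a ha => ha) (Nat.lt_succ_self _)
  unfold solve1 solve1_alt
  have h21 : (pvLoopA (alerset.length + 1) lines alerset PySem.Dict.empty PySem.Set.empty true).2.1
      = (pvLoopB (alerset.length + 1) (pvCands lines alerset) alerset PySem.Set.empty PySem.Dict.empty).2 := by
    conv_lhs => rw [hEq]
  have h22 : (pvLoopA (alerset.length + 1) lines alerset PySem.Dict.empty PySem.Set.empty true).2.2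
      = (pvLoopB (alerset.length + 1) (pvCands lines alerset) alerset PySem.Set.empty PySem.Dict.empty).1 := by
    conv_lhs => rw [hEq]
  simp only
  rw [h21, h22, pvCount_eq _ lines _ hFor 0]
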